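-- pv_equiv track=rewrite | github.com/UiHyeon/algorithm_PS | Programmers_Lv2_03.py | solution
-- ===== SOURCE A (Python) =====
-- import heapq
--
-- def solution(scoville, K):
--     answer = 0
--     heap = []
--
--     for num in scoville:
--         heapq.heappush(heap, num)
--
--     while heap[0] < K:
--         try:
--             heapq.heappush(heap, heapq.heappop(heap) + (heapq.heappop(heap)*2))
--             answer += 1
--         except:
--             return -1
--
--     return answer
-- ===== SOURCE B (Python) =====
-- from collections import deque
--
-- def solution(scoville, K):
--     # Two-queue technique: sort once, then merge two FIFO queues.
--     # Combined values are produced in nondecreasing order, so 'made' is a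
--     # sorted queue and the global minimum is always one of the two fronts.
--     orig = deque(sorted(scoville))
--     made = deque()
--     answer = 0
--     while True:
--         if orig and (not made or orig[0] <= made[0]):
--             front = orig[0]
--         else:
--             front = made[0]  # IndexError when both queues empty (scoville == [])
--         if front >= K:
--             return answer
--         if len(orig) + len(made) < 2:
--             return -1
--         a = _pop_min(orig, made)
--         b = _pop_min(orig, made)
--         made.append(a + 2 * b)
--         answer += 1
--
-- def _pop_min(orig, made):
--     if orig and (not made or orig[0] <= made[0]):
--         return orig.popleft()
--     return made.popleft()
-- ===== Notes on version B (the rewrite author's own statement) =====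
-- stated objective: alternative
-- what changed: Replaces the heap with the two-queue technique: sort once, then keep a FIFO queue of remaining originals and a FIFO queue of combined values (which come out in nondecreasing order), taking each minimum in O(1) from the two queue fronts, with explicit guards instead of A's bare-except/-1 exception control.
import Mathlib
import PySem

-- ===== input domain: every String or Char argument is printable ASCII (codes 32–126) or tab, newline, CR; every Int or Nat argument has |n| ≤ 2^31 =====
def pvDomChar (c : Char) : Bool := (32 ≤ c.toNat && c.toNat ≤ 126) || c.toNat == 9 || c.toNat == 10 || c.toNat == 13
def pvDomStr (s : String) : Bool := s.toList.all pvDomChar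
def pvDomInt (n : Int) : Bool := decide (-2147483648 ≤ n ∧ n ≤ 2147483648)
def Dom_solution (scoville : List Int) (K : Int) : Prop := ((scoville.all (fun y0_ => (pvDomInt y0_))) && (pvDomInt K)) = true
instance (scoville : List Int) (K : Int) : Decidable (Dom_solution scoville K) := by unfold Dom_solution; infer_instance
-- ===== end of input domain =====

-- B replaces the heap simulation by the two-queue technique: sort once, then merge two FIFO queues
-- (remaining originals / combined values, which are produced in nondecreasing order), popping minima
-- from the queue fronts in O(1), with explicit guards instead of A's exception-driven control
-- (objective: alternative).

-- ===== PORT A =====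
-- A's heapq calls are ported by their observable semantics on the operations A performs:
-- heap[0] is the minimum of the heap's contents, heappop removes and returns that minimum,
-- heappush adds its element. This is exact for Int elements: A never reads the heap list except
-- at heap[0], and equal Ints are indistinguishable, so the popped value sequence is identical.
-- `while heap[0] < K: try: heappush(heap, heappop(heap) + heappop(heap)*2); answer += 1 except: return -1`
def solLoopA (h : List Int) (K : Int) (ans : Int) : Int :=
  match hm : PySem.List.min? h (fun x => x) with
  | none => 0           -- heap[0] on an empty heap raises IndexError: excluded by Pre_solution
  | some m =>           -- heap[0] = m
    if m < K then
      -- heappop(heap) returns m and leaves h.erase m; the second heappop may raise (bare except → -1)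
      match hm2 : PySem.List.min? (h.erase m) (fun x => x) with
      | none => -1
      | some m2 => solLoopA ((h.erase m).erase m2 ++ [m + m2 * 2]) K (ans + 1)
    else ans
termination_by h.length
decreasing_by
  have hm1 := PySem.List.min?_mem hm
  have hm2' := PySem.List.min?_mem hm2
  have l1 : (h.erase m).length = h.length - 1 := List.length_erase_of_mem hm1
  have l2 : ((h.erase m).erase m2).length = (h.erase m).length - 1 := List.length_erase_of_mem hm2'
  have p1 : 0 < h.length := List.length_pos_of_mem hm1
  have p2 : 0 < (h.erase m).length := List.length_pos_of_mem hm2'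
  simp only [List.length_append, List.length_cons, List.length_nil, l2, l1]
  omega

def solution (scoville : List Int) (K : Int) : Int :=
  -- for num in scoville: heapq.heappush(heap, num)
  let heap := scoville.foldl (fun hp num => hp ++ [num]) []
  solLoopA heap K 0

-- ===== PORT B =====
-- def _pop_min(orig, made): if orig and (not made or orig[0] <= made[0]): return orig.popleft()
--                           return made.popleft()
def popMinB : List Int → List Int → Int × List Int × List Int
  | o :: os, [] => (o, os, [])
  | o :: os, m :: ms => if o ≤ m then (o, os, m :: ms) else (m, o :: os, ms)
  | [], m :: ms => (m, [], ms)
  | [], [] => (0, [], [])   -- unreachable: the loop guards len(orig)+len(made) >= 2 before popping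

lemma popMinB_length (orig made : List Int) (hne : orig ++ made ≠ []) :
    (popMinB orig made).2.1.length + (popMinB orig made).2.2.length + 1
      = orig.length + made.length := by
  match orig, made with
  | [], [] => exact absurd rfl hne
  | o :: os, [] => simp [popMinB]
  | [], m :: ms => simp [popMinB]
  | o :: os, m :: ms =>
    simp only [popMinB]
    split <;> simp <;> omega

-- Source B's front peek: orig[0] if orig and (not made or orig[0] <= made[0]) else made[0]
def frontB : List Int → List Int → Int
  | o :: _, [] => o
  | o :: _, m :: _ => if o ≤ m then o else m
  | [], m :: _ => m
  | [], [] => 0             -- unreachable under Pre_solution: made[0] raises IndexError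

-- the while-True loop of Source B
def solLoopB (orig made : List Int) (K : Int) (ans : Int) : Int :=
  if orig = [] ∧ made = [] then -1   -- made[0] raises IndexError; excluded by Pre_solution
  else if K ≤ frontB orig made then ans
  else if _hlen : orig.length + made.length < 2 then -1
  else
    let p := popMinB orig made
    let q := popMinB p.2.1 p.2.2
    solLoopB q.2.1 (q.2.2 ++ [p.1 + 2 * q.1]) K (ans + 1)
termination_by orig.length + made.length
decreasing_by
  have h1 : (popMinB orig made).2.1.length + (popMinB orig made).2.2.length + 1
      = orig.length + made.length := by
    apply popMinB_length
    intro hc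
    rcases List.append_eq_nil_iff.mp hc with ⟨e1, e2⟩
    simp_all
  have h2 : (popMinB (popMinB orig made).2.1 (popMinB orig made).2.2).2.1.length
      + (popMinB (popMinB orig made).2.1 (popMinB orig made).2.2).2.2.length + 1
      = (popMinB orig made).2.1.length + (popMinB orig made).2.2.length := by
    apply popMinB_length
    intro hc
    have := congrArg List.length hc
    simp only [List.length_append, List.length_nil] at this
    omega
  simp only [List.length_append, List.length_cons, List.length_nil]
  omega

def solution_alt (scoville : List Int) (K : Int) : Int :=
  solLoopB (PySem.List.sorted scoville (fun x => x)) [] K 0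

-- ===== PRECONDITION & SPEC =====
-- Pre_ excludes only the empty list, on which both A and B raise IndexError (heap[0] / made[0]).
def Pre_solution (scoville : List Int) (K : Int) : Prop := scoville ≠ []
instance (scoville : List Int) (K : Int) : Decidable (Pre_solution scoville K) := by unfold Pre_solution; infer_instance

def pvWitness_solution : List Int × Int := ([1, 2, 3, 9, 10, 12], 7)

def Spec_solution (scoville : List Int) (K : Int) (out : Int) : Prop := out = solution_alt scoville K
instance (scoville : List Int) (K : Int) (out : Int) : Decidable (Spec_solution scoville K out) := by unfold Spec_solution; infer_instance

-- ===== CLAIM (what is proved, stated in full; the proofs are below) =====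
def Claim_equal_solution : Prop := ∀ (scoville : List Int) (K : Int), Dom_solution scoville K → Pre_solution scoville K → Spec_solution scoville K (solution scoville K)

-- ===== LEMMAS AND PROOFS =====

lemma solLoopA_pop_none {h : List Int} {K ans m : Int}
    (hm : PySem.List.min? h (fun x => x) = some m) (hlt : m < K)
    (hm2 : PySem.List.min? (h.erase m) (fun x => x) = none) :
    solLoopA h K ans = -1 := by
  rw [solLoopA]
  split
  · simp_all
  · rename_i m' hm'
    rw [hm] at hm'; injection hm' with hm'; subst hm'
    rw [if_pos hlt]
    split
    · rfl
    · rename_i m2 hm2'; rw [hm2] at hm2'; exact absurd hm2' (by simp)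

lemma solLoopA_step {h : List Int} {K ans m m2 : Int}
    (hm : PySem.List.min? h (fun x => x) = some m) (hlt : m < K)
    (hm2 : PySem.List.min? (h.erase m) (fun x => x) = some m2) :
    solLoopA h K ans = solLoopA ((h.erase m).erase m2 ++ [m + m2 * 2]) K (ans + 1) := by
  rw [solLoopA]
  split
  · simp_all
  · rename_i m' hm'
    rw [hm] at hm'; injection hm' with hm'; subst hm'
    rw [if_pos hlt]
    split
    · rename_i hm2'; rw [hm2] at hm2'; exact absurd hm2' (by simp)
    · rename_i m2' hm2'; rw [hm2] at hm2'; injection hm2' with hm2'; subst hm2'; rfl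

lemma solLoopA_done {h : List Int} {K ans m : Int}
    (hm : PySem.List.min? h (fun x => x) = some m) (hge : ¬ m < K) :
    solLoopA h K ans = ans := by
  rw [solLoopA]
  split
  · simp_all
  · rename_i m' hm'
    rw [hm] at hm'; injection hm' with hm'; subst hm'
    rw [if_neg hge]

-- what one call of _pop_min does, on sorted queues
lemma popMinB_spec {orig made : List Int}
    (ho : List.Pairwise (fun a b => a ≤ b) orig)
    (hm : List.Pairwise (fun a b => a ≤ b) made)
    (hne : orig ++ made ≠ []) :
    (popMinB orig made).2.1 ++ (popMinB orig made).2.2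
        = (orig ++ made).erase (popMinB orig made).1
    ∧ (∀ e ∈ orig ++ made, (popMinB orig made).1 ≤ e)
    ∧ (popMinB orig made).1 ∈ orig ++ made
    ∧ List.Pairwise (fun a b => a ≤ b) (popMinB orig made).2.1
    ∧ List.Pairwise (fun a b => a ≤ b) (popMinB orig made).2.2
    ∧ (popMinB orig made).2.2.Sublist made := by
  match orig, made with
  | [], [] => exact absurd rfl hne
  | o :: os, [] =>
    refine ⟨by simp [popMinB], ?_, by simp [popMinB], (List.pairwise_cons.mp ho).2,
      by simp [popMinB], by simp [popMinB]⟩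
    intro e he
    rw [List.append_nil] at he
    show o ≤ e
    rcases List.mem_cons.mp he with rfl | he'
    · exact le_refl _
    · exact List.rel_of_pairwise_cons ho he'
  | [], m :: ms =>
    refine ⟨by simp [popMinB], ?_, by simp [popMinB], by simp [popMinB],
      (List.pairwise_cons.mp hm).2, by simp [popMinB]⟩
    intro e he
    rw [List.nil_append] at he
    show m ≤ e
    rcases List.mem_cons.mp he with rfl | he'
    · exact le_refl _
    · exact List.rel_of_pairwise_cons hm he'
  | o :: os, m :: ms =>
    by_cases hom : o ≤ m
    · have hval : popMinB (o :: os) (m :: ms) = (o, os, m :: ms) := by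
        simp [popMinB, hom]
      rw [hval]
      refine ⟨by simp, ?_, by simp, (List.pairwise_cons.mp ho).2, hm, List.Sublist.refl _⟩
      intro e he
      rcases List.mem_append.mp he with he' | he'
      · rcases List.mem_cons.mp he' with rfl | he''
        · exact le_refl _
        · exact List.rel_of_pairwise_cons ho he''
      · rcases List.mem_cons.mp he' with rfl | he''
        · exact hom
        · exact le_trans hom (List.rel_of_pairwise_cons hm he'')
    · have hval : popMinB (o :: os) (m :: ms) = (m, o :: os, ms) := by
        simp [popMinB, hom]
      have hmo : m < o := by omega
      have hmall : ∀ e ∈ (o :: os) ++ m :: ms, m ≤ e := by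
        intro e he
        rcases List.mem_append.mp he with he' | he'
        · rcases List.mem_cons.mp he' with rfl | he''
          · exact le_of_lt hmo
          · exact le_of_lt (lt_of_lt_of_le hmo (List.rel_of_pairwise_cons ho he''))
        · rcases List.mem_cons.mp he' with rfl | he''
          · exact le_refl _
          · exact List.rel_of_pairwise_cons hm he''
      rw [hval]
      refine ⟨?_, hmall, by simp, ho, (List.pairwise_cons.mp hm).2, by simp⟩
      have hnotin : m ∉ o :: os := by
        intro hmem
        have h2 : o ≤ m := by
          rcases List.mem_cons.mp hmem with rfl | hmem'
          · exact le_refl _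
          · exact List.rel_of_pairwise_cons ho hmem'
        omega
      rw [List.erase_append_right _ hnotin]
      simp [List.erase_cons_head]

-- the front peek returns the same value _pop_min would pop
lemma frontB_eq_popMinB (orig made : List Int) :
    frontB orig made = (popMinB orig made).1 := by
  match orig, made with
  | [], [] => rfl
  | o :: os, [] => rfl
  | [], m :: ms => rfl
  | o :: os, m :: ms => simp only [frontB, popMinB]; split <;> rfl

-- the loop invariant: every already-combined value d in `made` that would survive the next two
-- pops (second-minimum ≤ d) is at most the value those two pops combine to
def InvB (orig made : List Int) : Prop :=
  ∀ d ∈ made, ∀ m1 m2 : Int,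
    PySem.List.min? (orig ++ made) (fun x => x) = some m1 →
    PySem.List.min? ((orig ++ made).erase m1) (fun x => x) = some m2 →
    m2 ≤ d → d ≤ m1 + 2 * m2

lemma min?_eq_of_le {L : List Int} {m v : Int}
    (hm : PySem.List.min? L (fun x => x) = some m)
    (hv : v ∈ L) (hle : ∀ e ∈ L, v ≤ e) : m = v :=
  le_antisymm (PySem.List.min?_isMin hm v hv) (hle m (PySem.List.min?_mem hm))

lemma min?_exists_of_ne_nil {L : List Int} (hne : L ≠ []) :
    ∃ m, PySem.List.min? L (fun x => x) = some m := by
  cases hmm : PySem.List.min? L (fun x => x) with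
  | none => exact absurd ((PySem.List.min?_eq_none_iff _ _).mp hmm) hne
  | some m => exact ⟨m, rfl⟩

lemma loop_eq : ∀ (n : Nat) (orig made h : List Int),
    orig.length + made.length ≤ n →
    List.Pairwise (fun a b => a ≤ b) orig →
    List.Pairwise (fun a b => a ≤ b) made →
    InvB orig made →
    h.Perm (orig ++ made) → orig ++ made ≠ [] →
    ∀ (K ans : Int), solLoopA h K ans = solLoopB orig made K ans := by
  intro n
  induction n with
  | zero =>
    intro orig made h hlen _ _ _ _ hne
    have e1 : orig = [] := by apply List.eq_nil_of_length_eq_zero; omega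
    have e2 : made = [] := by apply List.eq_nil_of_length_eq_zero; omega
    subst e1; subst e2; exact absurd rfl hne
  | succ n ih =>
    intro orig made h hlen ho hmd hinv hperm hne K ans
    obtain ⟨he1, hle1, hmem1, ho1, hm1s, hsub1⟩ := popMinB_spec ho hmd hne
    set v := (popMinB orig made).1 with hvdef
    set o1 := (popMinB orig made).2.1 with ho1def
    set m1l := (popMinB orig made).2.2 with hm1ldef
    have hbothne : ¬ (orig = [] ∧ made = []) := by
      rintro ⟨e1, e2⟩; subst e1; subst e2; exact hne rfl
    have hhne : h ≠ [] := fun hc => hne (by rw [hc] at hperm; exact hperm.symm.eq_nil)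
    obtain ⟨m, hm⟩ := min?_exists_of_ne_nil hhne
    have hmv : m = v :=
      min?_eq_of_le hm (hperm.mem_iff.mpr hmem1) (fun e he => hle1 e (hperm.mem_iff.mp he))
    rw [hmv] at hm
    rw [solLoopB, if_neg hbothne, frontB_eq_popMinB, ← hvdef]
    by_cases hK : K ≤ v
    · rw [if_pos hK]
      exact solLoopA_done hm (by omega)
    · rw [if_neg hK]
      have hvK : v < K := by omega
      have hlenL : h.length = orig.length + made.length := by
        have := hperm.length_eq; simpa using this
      by_cases hlen2 : orig.length + made.length < 2
      · rw [dif_pos hlen2]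
        have hnone : PySem.List.min? (h.erase v) (fun x => x) = none := by
          rw [PySem.List.min?_eq_none_iff]
          apply List.eq_nil_of_length_eq_zero
          have hvh : v ∈ h := hperm.mem_iff.mpr hmem1
          have := List.length_erase_of_mem hvh
          have hp : 0 < h.length := List.length_pos_of_mem hvh
          omega
        exact solLoopA_pop_none hm hvK hnone
      · rw [dif_neg hlen2]
        -- second pop
        have hne1 : o1 ++ m1l ≠ [] := by
          intro hc
          have hl1 : o1.length + m1l.length + 1 = orig.length + made.length :=
            popMinB_length orig made hne
          have := congrArg List.length hc
          simp only [List.length_append, List.length_nil] at this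
          omega
        obtain ⟨he2, hle2, hmem2, ho2, hm2s, hsub2⟩ := popMinB_spec ho1 hm1s hne1
        set w := (popMinB o1 m1l).1 with hwdef
        set o2 := (popMinB o1 m1l).2.1 with ho2def
        set m2l := (popMinB o1 m1l).2.2 with hm2ldef
        -- h.erase v equals (as a multiset) o1 ++ m1l
        have hpe1 : (h.erase v).Perm (o1 ++ m1l) := by
          rw [he1]; exact hperm.erase v
        have herasene : h.erase v ≠ [] := fun hc => hne1 (by rw [hc] at hpe1; exact hpe1.symm.eq_nil)
        obtain ⟨m2, hm2⟩ := min?_exists_of_ne_nil herasene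
        have hm2w : m2 = w :=
          min?_eq_of_le hm2 (hpe1.mem_iff.mpr hmem2) (fun e he => hle2 e (hpe1.mem_iff.mp he))
        rw [hm2w] at hm2
        -- the minima of orig ++ made itself (for using InvB)
        obtain ⟨mv, hmv'⟩ := min?_exists_of_ne_nil hne
        have hmvv : mv = v := min?_eq_of_le hmv' hmem1 hle1
        rw [hmvv] at hmv'
        obtain ⟨mw, hmw'⟩ := min?_exists_of_ne_nil (L := (orig ++ made).erase v) (by rw [← he1]; exact hne1)
        have hmww : mw = w := by
          apply min?_eq_of_le hmw'
          · rw [← he1]; exact hmem2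
          · rw [← he1]; exact hle2
        rw [hmww] at hmw'
        -- facts about values
        have hvw : v ≤ w := hle1 w (List.mem_of_mem_erase (he1 ▸ hmem2))
        have hEge : ∀ e ∈ o2 ++ m2l, w ≤ e := fun e he =>
          hle2 e (List.mem_of_mem_erase (he2 ▸ he))
        set c : Int := v + 2 * w with hcdef
        -- members of m2l are members of made, and survived both pops
        have hm2l_made : ∀ r ∈ m2l, r ∈ made := fun r hr =>
          hsub1.mem (hsub2.mem hr)
        have hm2l_le_c : ∀ r ∈ m2l, r ≤ c := by
          intro r hr
          have hwr : w ≤ r := hEge r (List.mem_append_right _ hr)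
          exact hinv r (hm2l_made r hr) v w hmv' hmw' hwr
        -- sortedness of the new made queue
        have hmade' : List.Pairwise (fun a b => a ≤ b) (m2l ++ [c]) := by
          rw [List.pairwise_append]
          exact ⟨hm2s, by simp, by intro a ha b hb; rw [List.mem_singleton] at hb; subst hb
                                   exact hm2l_le_c a ha⟩
        -- the new combined state, as one list
        have hassoc : o2 ++ (m2l ++ [c]) = (o2 ++ m2l) ++ [c] := (List.append_assoc _ _ _).symm
        -- new invariant
        have hinv' : InvB o2 (m2l ++ [c]) := by
          intro d hd m1' m2' hm1' hm2' hled
          rw [hassoc] at hm1' hm2'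
          have hm1'mem : m1' ∈ (o2 ++ m2l) ++ [c] := PySem.List.min?_mem hm1'
          have hm1'min : ∀ y ∈ (o2 ++ m2l) ++ [c], m1' ≤ y :=
            fun y hy => PySem.List.min?_isMin hm1' y hy
          have hm2'memE : m2' ∈ ((o2 ++ m2l) ++ [c]).erase m1' := PySem.List.min?_mem hm2'
          have hm2'mem : m2' ∈ (o2 ++ m2l) ++ [c] := List.mem_of_mem_erase hm2'memE
          have hdc : d ≤ c := by
            rcases List.mem_append.mp hd with hd' | hd'
            · exact hm2l_le_c d hd'
            · rw [List.mem_singleton] at hd'; omega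
          by_cases hcw : w ≤ c
          · have hallT : ∀ e ∈ (o2 ++ m2l) ++ [c], w ≤ e := by
              intro e he
              rcases List.mem_append.mp he with he' | he'
              · exact hEge e he'
              · rw [List.mem_singleton] at he'; omega
            have h1 : w ≤ m1' := hallT _ hm1'mem
            have h2 : w ≤ m2' := hallT _ hm2'mem
            omega
          · -- c < w: c is the unique strict minimum; everything that survives is ≥ w > c
            have hcltw : c < w := by omega
            have hcnot : c ∉ o2 ++ m2l := by
              intro hmemc
              have := hEge c hmemc; omega
            have hm1'c : m1' = c := by
              have h1 : m1' ≤ c := hm1'min c (List.mem_append_right _ (by simp))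
              rcases List.mem_append.mp hm1'mem with he' | he'
              · have := hEge m1' he'; omega
              · rw [List.mem_singleton] at he'; exact he'
            have herase : ((o2 ++ m2l) ++ [c]).erase m1' = o2 ++ m2l := by
              rw [hm1'c, List.erase_append_right _ hcnot]
              simp [List.erase_cons_head]
            rw [herase] at hm2'memE
            have hwm2' : w ≤ m2' := hEge m2' hm2'memE
            -- d's hypotheses are contradictory
            rcases List.mem_append.mp hd with hd' | hd'
            · have hwd : w ≤ d := hEge d (List.mem_append_right _ hd')
              omega
            · rw [List.mem_singleton] at hd'; subst hd'; omega
        -- A makes the same step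
        have hstepA := solLoopA_step (ans := ans) hm hvK hm2
        have hmul : v + w * 2 = c := by omega
        rw [hmul] at hstepA
        rw [hstepA]
        -- the new heap is a permutation of the new queues
        have hperm' : ((h.erase v).erase w ++ [c]).Perm (o2 ++ (m2l ++ [c])) := by
          rw [hassoc]
          apply List.Perm.append_right
          rw [he2]
          exact hpe1.erase w
        -- lengths
        have hl1 : o1.length + m1l.length + 1 = orig.length + made.length :=
          popMinB_length orig made hne
        have hl2 : o2.length + m2l.length + 1 = o1.length + m1l.length :=
          popMinB_length o1 m1l hne1
        apply ih o2 (m2l ++ [c]) _ (by simp; omega) ho2 hmade' hinv' hperm'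
        intro hc
        have := congrArg List.length hc
        simp at this

-- ===== VERDICT (by name: the statement is the Claim_ definition above) =====
theorem solution_spec : Claim_equal_solution := by
  intro scoville K _ hpre
  unfold Spec_solution solution solution_alt
  rw [PySem.List.foldl_append_singleton, List.nil_append]
  have hp : (PySem.List.sorted scoville (fun x => x)).Perm scoville :=
    PySem.List.sorted_perm scoville (fun x => x) false
  have hne : PySem.List.sorted scoville (fun x => x) ++ [] ≠ [] := by
    rw [List.append_nil]
    intro hc
    exact hpre (by rw [hc] at hp; exact hp.symm.eq_nil)
  exact loop_eq scoville.length (PySem.List.sorted scoville (fun x => x)) [] scoville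
    (by simp [hp.length_eq])
    (PySem.List.sorted_pairwise scoville (fun x => x))
    (by simp)
    (by intro d hd; simp at hd)
    (by rw [List.append_nil]; exact hp.symm)
    hne K 0
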